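-- pv_equiv track=rewrite | github.com/HONGYANG-j/Intro-to-AI | Lab-Report/Lab-Report-1/app.py | full_dfs
-- ===== SOURCE A (Python) =====
-- from typing import Dict, List, Tuple
--
-- def full_dfs(graph: Dict[str, List[str]], start: str = 'A') -> List[str]:
--     visited, order = set(), []
--     all_nodes = sorted(graph.keys())
--
--     def dfs(node):
--         visited.add(node)
--         order.append(node)
--         for nb in graph.get(node, []):
--             if nb not in visited:
--                 dfs(nb)
--
--     if start in all_nodes:
--         dfs(start)
--     for node in all_nodes:
--         if node not in visited:
--             dfs(node)
--     return order
-- ===== SOURCE B (Python) =====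
-- from typing import Dict, List
--
-- def full_dfs(graph: Dict[str, List[str]], start: str = 'A') -> List[str]:
--     visited, order = set(), []
--     all_nodes = sorted(graph.keys())
--
--     def run(root):
--         stack = [root]
--         while stack:
--             node = stack.pop()
--             if node in visited:
--                 continue
--             visited.add(node)
--             order.append(node)
--             stack.extend(reversed(graph.get(node, [])))
--
--     if start in all_nodes:
--         run(start)
--     for node in all_nodes:
--         if node not in visited:
--             run(node)
--     return order
-- ===== Notes on version B (the rewrite author's own statement) =====
-- stated objective: alternative
-- what changed: The recursive dfs helper is replaced by an iterative explicit LIFO stack loop that marks nodes on pop and pushes each node's neighbors in reversed order, reproducing the same left-to-right preorder without Python recursion.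
import Mathlib
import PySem

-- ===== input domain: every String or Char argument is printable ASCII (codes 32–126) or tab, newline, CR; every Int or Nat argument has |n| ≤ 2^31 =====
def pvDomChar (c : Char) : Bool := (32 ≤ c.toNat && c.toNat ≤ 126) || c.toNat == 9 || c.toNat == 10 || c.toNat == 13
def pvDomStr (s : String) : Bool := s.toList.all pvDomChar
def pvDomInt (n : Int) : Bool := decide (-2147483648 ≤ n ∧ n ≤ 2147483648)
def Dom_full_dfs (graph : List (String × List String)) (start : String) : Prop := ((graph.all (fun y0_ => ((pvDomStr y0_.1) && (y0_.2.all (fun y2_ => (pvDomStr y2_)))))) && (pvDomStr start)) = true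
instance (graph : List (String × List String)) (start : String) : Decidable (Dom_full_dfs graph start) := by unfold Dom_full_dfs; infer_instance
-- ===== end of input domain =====

-- B replaces A's recursive dfs helper by an iterative explicit-stack loop (mark on pop,
-- neighbors pushed in reversed order); same traversal order, no Python recursion.

-- ===== PORT A =====
-- the dict accessors both Pythons share: graph.get(node, []) (first-match lookup of the
-- assoc list representing the dict) and sorted(graph.keys())
def pvNbrs (graph : List (String × List String)) (node : String) : List String :=
  ((graph.find? (fun p => p.1 == node)).map Prod.snd).getD []

def pvAllNodes (graph : List (String × List String)) : List String :=
  PySem.List.sorted (PySem.List.dedup (graph.map Prod.fst)) (fun x => x) false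

-- A's recursive dfs on the state (visited, order); the Nat is a fuel guard only —
-- full_dfs always supplies enough (every call is on an unvisited node), proved below.
def pvDfsA (graph : List (String × List String)) :
    Nat → (PySem.Set String × List String) → String → (PySem.Set String × List String)
  | 0, vo, _ => vo
  | f+1, vo, node =>
      (pvNbrs graph node).foldl
        (fun vo' nb => if PySem.Set.contains vo'.1 nb then vo' else pvDfsA graph f vo' nb)
        (PySem.Set.add vo.1 node, vo.2 ++ [node])

def pvFuel (graph : List (String × List String)) : Nat :=
  (graph.flatMap Prod.snd).length + 1

def full_dfs (graph : List (String × List String)) (start : String) : List String :=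
  let allNodes := pvAllNodes graph
  let vo0 : PySem.Set String × List String := (PySem.Set.empty, [])
  let vo1 := if allNodes.contains start then pvDfsA graph (pvFuel graph) vo0 start else vo0
  (allNodes.foldl
    (fun vo n => if PySem.Set.contains vo.1 n then vo else pvDfsA graph (pvFuel graph) vo n)
    vo1).2

-- ===== PORT B =====
-- termination measure for the stack loop: number of unvisited nodes among the stack and
-- all neighbor lists (proof-only; the loop itself never consults it)
def pvM (graph : List (String × List String)) (v : PySem.Set String) (stack : List String) : Nat :=
  ((stack ++ graph.flatMap Prod.snd).toFinset.filter (fun s => ¬ s ∈ v)).card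

-- the three facts the loop's termination proof cites
theorem pvM_skip (graph : List (String × List String)) (v : PySem.Set String)
    (n : String) (rest : List String) (h : n ∈ v) :
    pvM graph v rest = pvM graph v (n :: rest) := by
  unfold pvM
  rw [List.cons_append, List.toFinset_cons, Finset.filter_insert, if_neg (by simp [h])]

theorem pvM_visit (graph : List (String × List String)) (v : PySem.Set String)
    (n : String) (rest : List String) (h : n ∉ v) :
    pvM graph (PySem.Set.add v n) rest < pvM graph v (n :: rest) := by
  unfold pvM
  apply Finset.card_lt_card
  have hsub : ((rest ++ graph.flatMap Prod.snd).toFinset.filter (fun s => ¬ s ∈ PySem.Set.add v n)) ⊆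
      ((n :: rest ++ graph.flatMap Prod.snd).toFinset.filter (fun s => ¬ s ∈ v)) := by
    intro x hx
    rw [Finset.mem_filter] at hx ⊢
    rw [List.mem_toFinset] at hx ⊢
    refine ⟨List.mem_cons_of_mem _ hx.1, fun hxv => hx.2 ?_⟩
    exact (PySem.Set.mem_add v n x).mpr (Or.inl hxv)
  rw [Finset.ssubset_iff_of_subset hsub]
  refine ⟨n, ?_, ?_⟩
  · rw [Finset.mem_filter, List.mem_toFinset]
    exact ⟨List.mem_cons_self, h⟩
  · rw [Finset.mem_filter]
    intro hx
    exact hx.2 ((PySem.Set.mem_add v n n).mpr (Or.inr rfl))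

theorem pvNbrs_subset (graph : List (String × List String)) (n : String) :
    ∀ x ∈ pvNbrs graph n, x ∈ graph.flatMap Prod.snd := by
  intro x hx
  unfold pvNbrs at hx
  cases hfind : graph.find? (fun p => p.1 == n) with
  | none => simp [hfind] at hx
  | some p =>
      rw [hfind] at hx
      exact List.mem_flatMap.mpr ⟨p, List.mem_of_find?_eq_some hfind, hx⟩

theorem pvM_absorb (graph : List (String × List String)) (v : PySem.Set String)
    (xs rest : List String) (hxs : ∀ x ∈ xs, x ∈ graph.flatMap Prod.snd) :
    pvM graph v (xs ++ rest) = pvM graph v rest := by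
  unfold pvM
  have : (xs ++ rest ++ graph.flatMap Prod.snd).toFinset = (rest ++ graph.flatMap Prod.snd).toFinset := by
    ext x
    simp only [List.mem_toFinset, List.mem_append]
    constructor
    · rintro ((h | h) | h)
      · exact Or.inr (hxs x h)
      · exact Or.inl h
      · exact Or.inr h
    · rintro (h | h)
      · exact Or.inl (Or.inr h)
      · exact Or.inr h
  rw [this]

-- B's while loop; the Lean stack holds the top at the HEAD (= reversed Python list), so
-- Python's stack.pop() is taking the head and stack.extend(reversed(nbrs)) is nbrs ++ rest.
def pvLoopB (graph : List (String × List String))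
    (vo : PySem.Set String × List String) (stack : List String) :
    PySem.Set String × List String :=
  match stack with
  | [] => vo
  | n :: rest =>
      if h : PySem.Set.contains vo.1 n then pvLoopB graph vo rest
      else pvLoopB graph (PySem.Set.add vo.1 n, vo.2 ++ [n]) (pvNbrs graph n ++ rest)
termination_by (pvM graph vo.1 stack, stack.length)
decreasing_by
  · rw [pvM_skip graph vo.1 n rest ((PySem.Set.contains_iff vo.1 n).mp h)]
    exact Prod.Lex.right _ (Nat.lt_succ_self _)
  · apply Prod.Lex.left
    calc pvM graph (PySem.Set.add vo.1 n) (pvNbrs graph n ++ rest)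
        = pvM graph (PySem.Set.add vo.1 n) rest :=
          pvM_absorb _ _ _ _ (pvNbrs_subset graph n)
      _ < pvM graph vo.1 (n :: rest) :=
          pvM_visit _ _ _ _ (fun hm => h ((PySem.Set.contains_iff vo.1 n).mpr hm))

def full_dfs_alt (graph : List (String × List String)) (start : String) : List String :=
  let allNodes := pvAllNodes graph
  let vo0 : PySem.Set String × List String := (PySem.Set.empty, [])
  let vo1 := if allNodes.contains start then pvLoopB graph vo0 [start] else vo0
  (allNodes.foldl
    (fun vo n => if PySem.Set.contains vo.1 n then vo else pvLoopB graph vo [n])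
    vo1).2

-- ===== PRECONDITION & SPEC =====
def Spec_full_dfs (graph : List (String × List String)) (start : String) (out : List String) : Prop := out = full_dfs_alt graph start
instance (graph : List (String × List String)) (start : String) (out : List String) : Decidable (Spec_full_dfs graph start out) := by unfold Spec_full_dfs; infer_instance

-- ===== CLAIM (what is proved, stated in full; the proofs are below) =====
def Claim_equal_full_dfs : Prop := ∀ (graph : List (String × List String)) (start : String), Dom_full_dfs graph start → Spec_full_dfs graph start (full_dfs graph start)

-- ===== LEMMAS AND PROOFS =====

-- visited never shrinks across a recursive dfs call of A
theorem pvDfsA_mono (graph : List (String × List String)) :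
    ∀ (f : Nat) (vo : PySem.Set String × List String) (n : String),
      vo.1 ⊆ (pvDfsA graph f vo n).1 := by
  intro f
  induction f with
  | zero => intro vo n; rw [pvDfsA]; exact fun _ h => h
  | succ f ih =>
      intro vo n
      rw [pvDfsA]
      have hfold : ∀ (ns : List String) (w : PySem.Set String × List String),
          w.1 ⊆ (ns.foldl
            (fun vo' nb => if PySem.Set.contains vo'.1 nb then vo' else pvDfsA graph f vo' nb)
            w).1 := by
        intro ns
        induction ns with
        | nil => intro w; exact fun _ h => h
        | cons b bs ihb =>
            intro w
            rw [List.foldl_cons]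
            by_cases hb : PySem.Set.contains w.1 b
            · rw [if_pos hb]; exact ihb w
            · rw [if_neg hb]
              exact List.Subset.trans (ih w b) (ihb _)
      refine List.Subset.trans ?_ (hfold _ _)
      exact fun x hx => (PySem.Set.mem_add vo.1 n x).mpr (Or.inl hx)

theorem pvM_mono (graph : List (String × List String)) {v v' : PySem.Set String}
    (hv : v ⊆ v') (l : List String) : pvM graph v' l ≤ pvM graph v l := by
  unfold pvM
  apply Finset.card_le_card
  intro x hx
  rw [Finset.mem_filter] at hx ⊢
  exact ⟨hx.1, fun hm => hx.2 (hv hm)⟩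

theorem pvM_pos (graph : List (String × List String)) (v : PySem.Set String)
    (n : String) (rest : List String) (h : n ∉ v) : 0 < pvM graph v (n :: rest) := by
  unfold pvM
  apply Finset.card_pos.mpr
  exact ⟨n, by rw [Finset.mem_filter, List.mem_toFinset]; exact ⟨List.mem_cons_self, h⟩⟩

theorem pvM_le_fuel (graph : List (String × List String)) (v : PySem.Set String)
    (n : String) : pvM graph v [n] ≤ pvFuel graph := by
  unfold pvM pvFuel
  calc (([n] ++ graph.flatMap Prod.snd).toFinset.filter (fun s => ¬ s ∈ v)).card
      ≤ ([n] ++ graph.flatMap Prod.snd).toFinset.card := Finset.card_filter_le _ _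
    _ ≤ ([n] ++ graph.flatMap Prod.snd).length := List.toFinset_card_le _
    _ = (graph.flatMap Prod.snd).length + 1 := by simp

-- the heart: one iterative run from n equals one recursive dfs call from n,
-- then the loop continues with the rest of the stack
theorem pvStep (graph : List (String × List String)) :
    ∀ (f : Nat) (vo : PySem.Set String × List String) (n : String) (rest : List String),
      n ∉ vo.1 → pvM graph vo.1 [n] ≤ f →
      pvLoopB graph vo (n :: rest) = pvLoopB graph (pvDfsA graph f vo n) rest := by
  intro f
  induction f with
  | zero =>
      intro vo n rest hn hf
      exact absurd hf (by have := pvM_pos graph vo.1 n [] hn; omega)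
  | succ f ih =>
      intro vo n rest hn hf
      have hc : ¬ PySem.Set.contains vo.1 n := fun h => hn ((PySem.Set.contains_iff vo.1 n).mp h)
      rw [pvLoopB, dif_neg hc, pvDfsA]
      have inner : ∀ (ns : List String), (∀ x ∈ ns, x ∈ graph.flatMap Prod.snd) →
          ∀ (w : PySem.Set String × List String) (rest' : List String),
            pvM graph w.1 [] ≤ f →
            pvLoopB graph w (ns ++ rest') =
              pvLoopB graph
                (ns.foldl
                  (fun vo' nb => if PySem.Set.contains vo'.1 nb then vo' else pvDfsA graph f vo' nb)
                  w) rest' := by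
        intro ns
        induction ns with
        | nil => intro _ w rest' _; rw [List.nil_append, List.foldl_nil]
        | cons b bs ihb =>
            intro hmem w rest' hw
            rw [List.cons_append, List.foldl_cons]
            by_cases hb : PySem.Set.contains w.1 b
            · rw [pvLoopB, dif_pos hb, if_pos hb]
              exact ihb (fun x hx => hmem x (List.mem_cons_of_mem _ hx)) w rest' hw
            · rw [if_neg hb]
              have hbmem : b ∉ w.1 := fun h => hb ((PySem.Set.contains_iff w.1 b).mpr h)
              have hfuel : pvM graph w.1 [b] ≤ f := by
                have habs : pvM graph w.1 ([b] ++ []) = pvM graph w.1 [] :=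
                  pvM_absorb graph w.1 [b] []
                    (by intro x hx
                        rw [List.mem_singleton] at hx
                        rw [hx]
                        exact hmem b List.mem_cons_self)
                exact le_trans (le_of_eq habs) hw
              rw [ih w b (bs ++ rest') hbmem hfuel]
              refine ihb (fun x hx => hmem x (List.mem_cons_of_mem _ hx)) _ rest' ?_
              exact le_trans (pvM_mono graph (pvDfsA_mono graph f w b) []) hw
      refine inner (pvNbrs graph n) (pvNbrs_subset graph n) _ rest ?_
      show pvM graph (PySem.Set.add vo.1 n) [] ≤ f
      have : pvM graph (PySem.Set.add vo.1 n) [] < pvM graph vo.1 [n] :=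
        pvM_visit graph vo.1 n [] hn
      omega

theorem pvRun (graph : List (String × List String))
    (vo : PySem.Set String × List String) (n : String) (hn : n ∉ vo.1) :
    pvLoopB graph vo [n] = pvDfsA graph (pvFuel graph) vo n := by
  rw [pvStep graph (pvFuel graph) vo n [] hn (pvM_le_fuel graph vo.1 n), pvLoopB]

-- ===== VERDICT (by name: the statement is the Claim_ definition above) =====
theorem full_dfs_spec : Claim_equal_full_dfs := by
  intro graph start _
  show full_dfs graph start = full_dfs_alt graph start
  unfold full_dfs full_dfs_alt
  dsimp only
  have hstepeq : ∀ (vo : PySem.Set String × List String) (n : String),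
      (if PySem.Set.contains vo.1 n then vo else pvDfsA graph (pvFuel graph) vo n) =
      (if PySem.Set.contains vo.1 n then vo else pvLoopB graph vo [n]) := by
    intro vo n
    by_cases hc : PySem.Set.contains vo.1 n
    · rw [if_pos hc, if_pos hc]
    · rw [if_neg hc, if_neg hc,
        pvRun graph vo n (fun h => hc ((PySem.Set.contains_iff vo.1 n).mpr h))]
  have hfold : ∀ (ns : List String) (vo : PySem.Set String × List String),
      ns.foldl
        (fun vo n => if PySem.Set.contains vo.1 n then vo else pvDfsA graph (pvFuel graph) vo n)
        vo =
      ns.foldl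
        (fun vo n => if PySem.Set.contains vo.1 n then vo else pvLoopB graph vo [n]) vo := by
    intro ns
    induction ns with
    | nil => intro vo; rfl
    | cons b bs ihb =>
        intro vo
        rw [List.foldl_cons, List.foldl_cons, hstepeq vo b]
        exact ihb _
  have hinit :
      (if (pvAllNodes graph).contains start
        then pvDfsA graph (pvFuel graph) (PySem.Set.empty, ([] : List String)) start
        else (PySem.Set.empty, ([] : List String))) =
      (if (pvAllNodes graph).contains start
        then pvLoopB graph (PySem.Set.empty, ([] : List String)) [start]
        else (PySem.Set.empty, ([] : List String))) := by
    by_cases hs : (pvAllNodes graph).contains start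
    · rw [if_pos hs, if_pos hs, pvRun graph _ start (by simp [PySem.Set.empty])]
    · rw [if_neg hs, if_neg hs]
  rw [hfold, hinit]
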